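-- pv_equiv track=rewrite | github.com/dangdungvn/dungdai | tien trinh/fifo.py | tongtgcho
-- ===== SOURCE A (Python) =====
-- def tongtgcho(a):
-- 	res = []
-- 	sum = 0
-- 	for i in range(len(a)):
-- 		if i == 0:
-- 			res.append(a[i])
-- 		else:
-- 			res.append(res[i - 1] + a[i])
-- 	res.insert(0,0)
-- 	res = res[:-2]
-- 	for i in res:
-- 		sum += i
-- 	return sum
-- ===== SOURCE B (Python) =====
-- def tongtgcho(a):
--     n = len(a)
--     s = 0
--     for j in range(n - 2):
--         s += a[j] * (n - 2 - j)
--     return s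
-- ===== Notes on version B (the rewrite author's own statement) =====
-- stated objective: simpler
-- what changed: Replaces A's build-prefix-sum-list / insert(0,0) / truncate-slice / summation pipeline with one direct loop accumulating each element times its closed-form coefficient n-2-j.
import Mathlib
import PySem

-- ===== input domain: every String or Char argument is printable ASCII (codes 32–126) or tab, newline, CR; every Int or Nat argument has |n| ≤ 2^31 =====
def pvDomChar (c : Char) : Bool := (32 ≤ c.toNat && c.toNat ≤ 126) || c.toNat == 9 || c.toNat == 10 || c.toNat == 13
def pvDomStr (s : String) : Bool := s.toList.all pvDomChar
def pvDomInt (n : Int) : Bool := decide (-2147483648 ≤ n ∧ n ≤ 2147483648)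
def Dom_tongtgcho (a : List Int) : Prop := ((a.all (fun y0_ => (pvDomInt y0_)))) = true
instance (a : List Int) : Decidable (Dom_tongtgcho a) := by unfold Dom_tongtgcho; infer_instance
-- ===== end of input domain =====

-- B replaces A's prefix-sum list / insert(0,0) / slice / sum pipeline with one direct
-- loop multiplying each element by its closed-form coefficient (simpler, O(1) space).

-- ===== PORT A =====
-- loop body of A's first for-loop (append a[i], or res[i-1] + a[i])
def tongtgchoStep (a : List Int) (res : List Int) (i : Nat) : List Int :=
  if i = 0 then res ++ [a.getD i 0] else res ++ [res.getD (i - 1) 0 + a.getD i 0]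

def tongtgcho (a : List Int) : Int :=
  let res := (List.range a.length).foldl (tongtgchoStep a) []
  let res2 := PySem.List.insert res 0 0                      -- res.insert(0, 0)
  let res3 := PySem.List.slice res2 none (some (-2))          -- res = res[:-2]
  res3.foldl (fun s i => s + i) 0                             -- for i in res: sum += i

-- ===== PORT B =====
def tongtgcho_alt (a : List Int) : Int :=
  (List.range (a.length - 2)).foldl
    (fun s j => s + a.getD j 0 * ((a.length : Int) - 2 - (j : Int))) 0

-- ===== PRECONDITION & SPEC =====
def Spec_tongtgcho (a : List Int) (out : Int) : Prop := out = tongtgcho_alt a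
instance (a : List Int) (out : Int) : Decidable (Spec_tongtgcho a out) := by unfold Spec_tongtgcho; infer_instance

-- ===== CLAIM (what is proved, stated in full; the proofs are below) =====
def Claim_equal_tongtgcho : Prop := ∀ (a : List Int), Dom_tongtgcho a → Spec_tongtgcho a (tongtgcho a)

-- ===== LEMMAS AND PROOFS =====

-- A's first loop builds exactly the prefix sums of a.
theorem tongtgcho_loop_eq (a : List Int) (m : Nat) (hm : m ≤ a.length) :
    (List.range m).foldl (tongtgchoStep a) []
      = (List.range m).map (fun i => (a.take (i + 1)).sum) := by
  induction m with
  | zero => simp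
  | succ k ih =>
    rw [List.range_succ, List.foldl_append, List.map_append, ih (Nat.le_of_succ_le hm)]
    simp only [List.foldl_cons, List.foldl_nil, List.map_cons, List.map_nil]
    unfold tongtgchoStep
    rcases Nat.eq_zero_or_pos k with hk | hk
    · subst hk
      rcases a with _ | ⟨x, t⟩
      · simp at hm
      · simp [List.getD]
    · rw [if_neg (by omega)]
      have hk1 : k - 1 < k := by omega
      have hget : (List.map (fun i => (List.take (i + 1) a).sum) (List.range k)).getD (k - 1) 0
          = (List.take k a).sum := by
        have h1 : (List.range k)[k - 1]? = some (k - 1) := List.getElem?_range hk1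
        rw [List.getD_eq_getElem?_getD, List.getElem?_map, h1]
        simp [Nat.sub_add_cancel hk]
      have hk2 : k < a.length := hm
      have htake : List.take (k + 1) a = List.take k a ++ [a.getD k 0] := by
        rw [List.take_add_one, List.getElem?_eq_getElem hk2]
        simp [List.getD_eq_getElem?_getD, List.getElem?_eq_getElem hk2]
      rw [hget, htake]
      simp

-- prefix sum as a sum of indexed elements
theorem take_sum_eq (a : List Int) (k : Nat) (hk : k ≤ a.length) :
    (a.take k).sum = ((List.range k).map (fun j => a.getD j 0)).sum := by
  induction k with
  | zero => simp
  | succ m ih =>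
    have hm : m < a.length := hk
    rw [List.take_add_one, List.getElem?_eq_getElem hm, List.sum_append,
        ih (Nat.le_of_lt hm), List.range_succ, List.map_append, List.sum_append]
    simp [List.getD_eq_getElem?_getD, List.getElem?_eq_getElem hm]

-- exchange of summation: Σ_{i<m} (prefix-sum i+1) = Σ_{j<m} a[j]·(m−j)
theorem sum_exchange (a : List Int) (m : Nat) (hm : m ≤ a.length) :
    ((List.range m).map (fun i => (a.take (i + 1)).sum)).sum
      = ((List.range m).map (fun j => a.getD j 0 * ((m : Int) - (j : Int)))).sum := by
  induction m with
  | zero => simp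
  | succ k ih =>
    simp only [List.range_succ, List.map_append, List.sum_append, List.map_cons,
      List.map_nil, List.sum_cons, List.sum_nil]
    rw [ih (Nat.le_of_succ_le hm)]
    push_cast
    have hpt : ∀ j : Nat, a.getD j 0 * (((k : Int) + 1) - (j : Int))
        = a.getD j 0 * ((k : Int) - (j : Int)) + a.getD j 0 := fun j => by ring
    have hsplit :
        ((List.range k).map (fun j => a.getD j 0 * (((k : Int) + 1) - (j : Int)))).sum
          = ((List.range k).map (fun j => a.getD j 0 * ((k : Int) - (j : Int)))).sum
            + ((List.range k).map (fun j => a.getD j 0)).sum := by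
      simp only [hpt]
      rw [PySem.List.sum_map_add_int]
    rw [hsplit, take_sum_eq a (k + 1) hm]
    simp only [List.range_succ, List.map_append, List.sum_append, List.map_cons,
      List.map_nil, List.sum_cons, List.sum_nil]
    ring

-- B's fold as a mapped sum
theorem alt_eq_sum (a : List Int) :
    tongtgcho_alt a
      = ((List.range (a.length - 2)).map
          (fun j => a.getD j 0 * ((a.length : Int) - 2 - (j : Int)))).sum := by
  unfold tongtgcho_alt
  rw [PySem.List.foldl_add]
  simp

theorem foldl_sum_eq (l : List Int) : l.foldl (fun s i => s + i) 0 = l.sum := by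
  rw [PySem.List.foldl_add (g := fun i => i)]
  simp

-- ===== VERDICT (by name: the statement is the Claim_ definition above) =====
theorem tongtgcho_spec : Claim_equal_tongtgcho := by
  intro a _
  unfold Spec_tongtgcho tongtgcho
  simp only [PySem.List.insert_zero]
  rw [tongtgcho_loop_eq a a.length (le_refl _)]
  set f : Nat → Int := fun i => (a.take (i + 1)).sum with hf
  have hlen : ((0 : Int) :: (List.range a.length).map f).length = a.length + 1 := by simp
  rw [PySem.List.slice_to_neg_ofNat _ 2 (by norm_num), hlen]
  have hsub : a.length + 1 - 2 = a.length - 1 := by omega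
  rw [hsub]
  rcases Nat.eq_zero_or_pos a.length with h0 | h0
  · rw [alt_eq_sum]
    simp [h0]
  · rcases Nat.lt_or_ge a.length 2 with h2 | h2
    · have h1 : a.length = 1 := by omega
      rw [alt_eq_sum]
      simp [h1]
    · have hn1 : a.length - 1 = (a.length - 2) + 1 := by omega
      rw [hn1, List.take_succ_cons, foldl_sum_eq, List.sum_cons,
          ← List.map_take, List.take_range, Nat.min_eq_left (by omega), hf,
          sum_exchange a (a.length - 2) (by omega), alt_eq_sum]
      have hcast : ((a.length - 2 : Nat) : Int) = (a.length : Int) - 2 := by omega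
      rw [hcast]
      ring
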